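-- pv_equiv track=rewrite | github.com/Strophox/leaves-game | leaves.py | _board_pruned
-- ===== SOURCE A (Python) =====
-- def _board_pruned(board_pieces):
--     """Remove all leaves not attached to a log piece from the board."""
--     valid_pieces = dict()
--     for (x,y) in board_pieces:
--         is_log = board_pieces[(x,y)] == -1
--         has_neighboring_logs = any(board_pieces[(x+dx,y+dy)] == -1
--                                    for (dx,dy) in [(1,0),(0,1),(-1,0),(0,-1)]
--                                    if (x+dx,y+dy) in board_pieces)
--         if is_log or has_neighboring_logs:
--             valid_pieces[(x,y)] = board_pieces[(x,y)]
--     return valid_pieces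
-- ===== SOURCE B (Python) =====
-- def _board_pruned(board_pieces):
--     """Remove all leaves not attached to a log piece from the board."""
--     # Mark from logs outward: every log is valid, and so is any board cell
--     # adjacent to a log; then keep the board entries whose coordinate was marked.
--     valid = set()
--     for (x, y), v in board_pieces.items():
--         if v == -1:
--             valid.add((x, y))
--             for dx, dy in ((1, 0), (0, 1), (-1, 0), (0, -1)):
--                 n = (x + dx, y + dy)
--                 if n in board_pieces:
--                     valid.add(n)
--     return {k: v for k, v in board_pieces.items() if k in valid}
-- ===== Notes on version B (the rewrite author's own statement) =====
-- stated objective: alternative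
-- what changed: Instead of testing every board cell and its four neighbours for an adjacent log, B makes one marking pass that spreads validity outward from each log (the log itself plus its in-board neighbours go into a set) and then filters the board by membership in that set.
import Mathlib
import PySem

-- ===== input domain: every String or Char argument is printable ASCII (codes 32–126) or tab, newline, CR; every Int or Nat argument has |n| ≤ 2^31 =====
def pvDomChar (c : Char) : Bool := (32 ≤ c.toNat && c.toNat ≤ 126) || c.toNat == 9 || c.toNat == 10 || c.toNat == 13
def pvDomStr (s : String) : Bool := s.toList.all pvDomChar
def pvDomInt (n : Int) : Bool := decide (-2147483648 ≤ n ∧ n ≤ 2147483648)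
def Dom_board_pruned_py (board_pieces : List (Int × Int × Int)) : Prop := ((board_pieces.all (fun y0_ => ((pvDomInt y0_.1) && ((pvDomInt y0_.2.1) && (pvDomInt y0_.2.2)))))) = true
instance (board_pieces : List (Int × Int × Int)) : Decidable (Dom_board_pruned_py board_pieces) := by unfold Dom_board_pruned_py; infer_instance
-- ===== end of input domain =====

-- B marks valid cells by spreading outward from the logs (one marking pass, then one
-- filter pass) instead of testing every cell's four neighbours for a log; same output.

-- shared encoding helpers: the Python dict {(x,y): v} is the triple list [(x,y,v)];
-- pvLookup is board_pieces[(x,y)] as first-match (none = key absent), pvContains is '(x,y) in board_pieces'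
def pvLookup (bp : List (Int × Int × Int)) (k : Int × Int) : Option Int :=
  (bp.find? (fun e => e.1 == k.1 && e.2.1 == k.2)).map (fun e => e.2.2)

def pvContains (bp : List (Int × Int × Int)) (k : Int × Int) : Bool :=
  bp.any (fun e => e.1 == k.1 && e.2.1 == k.2)

def pvDirs : List (Int × Int) := [(1, 0), (0, 1), (-1, 0), (0, -1)]

-- ===== PORT A =====
-- Python dict insert valid_pieces[(x,y)] = v (overwrite in place, new keys append)
def pvInsert (acc : List (Int × Int × Int)) (x y v : Int) : List (Int × Int × Int) :=
  if acc.any (fun e => e.1 == x && e.2.1 == y) then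
    acc.map (fun e => if e.1 == x && e.2.1 == y then (x, y, v) else e)
  else acc ++ [(x, y, v)]

def board_pruned_py (board_pieces : List (Int × Int × Int)) : List (Int × Int × Int) :=
  board_pieces.foldl (fun acc e =>
    match pvLookup board_pieces (e.1, e.2.1) with
    | none => acc  -- unreachable: (x,y) is a key of board_pieces
    | some v =>
      let isLog := v == -1
      -- '(x+dx,y+dy) in board_pieces and board_pieces[(x+dx,y+dy)] == -1', combined:
      -- pvLookup is none exactly when the neighbour key is absent
      let hasN := pvDirs.any (fun d =>
        pvLookup board_pieces (e.1 + d.1, e.2.1 + d.2) == some (-1))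
      if isLog || hasN then pvInsert acc e.1 e.2.1 v else acc) []

-- ===== PORT B =====
def pvMark (bp : List (Int × Int × Int)) (s : PySem.Set (Int × Int)) (e : Int × Int × Int) :
    PySem.Set (Int × Int) :=
  if e.2.2 == -1 then
    pvDirs.foldl (fun s d =>
      if pvContains bp (e.1 + d.1, e.2.1 + d.2) then PySem.Set.add s (e.1 + d.1, e.2.1 + d.2)
      else s)
    (PySem.Set.add s (e.1, e.2.1))
  else s

def pvValid (bp : List (Int × Int × Int)) : PySem.Set (Int × Int) :=
  bp.foldl (pvMark bp) PySem.Set.empty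

def board_pruned_py_alt (board_pieces : List (Int × Int × Int)) : List (Int × Int × Int) :=
  let valid := pvValid board_pieces
  board_pieces.filter (fun e => PySem.Set.contains valid (e.1, e.2.1))

-- ===== PRECONDITION & SPEC =====
-- Pre_ excludes triple lists with a duplicated (x,y) key: such lists are not the encoding of
-- any Python dict argument (dict keys are unique), so A's first-match/overwrite behaviour on
-- them is an artefact of the encoding.
def Pre_board_pruned_py (board_pieces : List (Int × Int × Int)) : Prop :=
  (board_pieces.map (fun e => (e.1, e.2.1))).Nodup

instance (board_pieces : List (Int × Int × Int)) : Decidable (Pre_board_pruned_py board_pieces) := by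
  unfold Pre_board_pruned_py; infer_instance

def pvWitness_board_pruned_py : (List (Int × Int × Int)) := [(0, 0, -1), (1, 0, 2), (3, 3, 1)]

def Spec_board_pruned_py (board_pieces : List (Int × Int × Int)) (out : List (Int × Int × Int)) : Prop := out = board_pruned_py_alt board_pieces
instance (board_pieces : List (Int × Int × Int)) (out : List (Int × Int × Int)) : Decidable (Spec_board_pruned_py board_pieces out) := by unfold Spec_board_pruned_py; infer_instance

-- ===== CLAIM (what is proved, stated in full; the proofs are below) =====
def Claim_equal_board_pruned_py : Prop := ∀ (board_pieces : List (Int × Int × Int)), Dom_board_pruned_py board_pieces → Pre_board_pruned_py board_pieces → Spec_board_pruned_py board_pieces (board_pruned_py board_pieces)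

-- ===== LEMMAS AND PROOFS =====

-- A's per-cell keep-predicate
def pvP (bp : List (Int × Int × Int)) (e : Int × Int × Int) : Bool :=
  (pvLookup bp (e.1, e.2.1) == some (-1)) ||
    pvDirs.any (fun d => pvLookup bp (e.1 + d.1, e.2.1 + d.2) == some (-1))

theorem pvLookup_some_mem {bp : List (Int × Int × Int)} {k : Int × Int} {v : Int}
    (h : pvLookup bp k = some v) :
    ∃ e ∈ bp, e.1 = k.1 ∧ e.2.1 = k.2 ∧ e.2.2 = v := by
  unfold pvLookup at h
  rcases hf : bp.find? (fun e => e.1 == k.1 && e.2.1 == k.2) with _ | e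
  · simp [hf] at h
  · have hm := List.mem_of_find?_eq_some hf
    have hp := List.find?_some hf
    simp at hp
    simp [hf] at h
    exact ⟨e, hm, hp.1, hp.2, h⟩

theorem pvLookup_of_mem {bp : List (Int × Int × Int)} {e : Int × Int × Int}
    (hnd : (bp.map (fun e => (e.1, e.2.1))).Nodup) (he : e ∈ bp) :
    pvLookup bp (e.1, e.2.1) = some e.2.2 := by
  induction bp with
  | nil => simp at he
  | cons a l ih =>
    simp only [List.map_cons, List.nodup_cons] at hnd
    rcases List.mem_cons.mp he with rfl | hl
    · simp [pvLookup, List.find?]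
    · have hne : ¬(a.1 == e.1 && a.2.1 == e.2.1) = true := by
        intro h
        simp at h
        exact hnd.1 (by
          refine List.mem_map.mpr ⟨e, hl, ?_⟩
          simp [h.1, h.2])
      simpa [pvLookup, List.find?_cons, hne] using ih hnd.2 hl

theorem pvContains_of_mem {bp : List (Int × Int × Int)} {e : Int × Int × Int} (he : e ∈ bp) :
    pvContains bp (e.1, e.2.1) = true := by
  unfold pvContains
  exact List.any_eq_true.mpr ⟨e, he, by simp⟩

-- membership through the inner neighbour-marking fold of B
theorem pvMem_dirs_fold (bp : List (Int × Int × Int)) (e : Int × Int × Int)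
    (l : List (Int × Int)) (s : PySem.Set (Int × Int)) (x : Int × Int) :
    x ∈ l.foldl (fun s d =>
        if pvContains bp (e.1 + d.1, e.2.1 + d.2) then PySem.Set.add s (e.1 + d.1, e.2.1 + d.2)
        else s) s ↔
      x ∈ s ∨ ∃ d ∈ l, x = (e.1 + d.1, e.2.1 + d.2) ∧ pvContains bp x = true := by
  induction l generalizing s with
  | nil => simp
  | cons d l ih =>
    simp only [List.foldl_cons]
    by_cases hc : pvContains bp (e.1 + d.1, e.2.1 + d.2) = true
    · rw [if_pos hc, ih]
      constructor
      · rintro (hx | ⟨d', hd', rfl, hcx⟩)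
        · rcases (PySem.Set.mem_add ..).mp hx with hx | rfl
          · exact Or.inl hx
          · exact Or.inr ⟨d, List.mem_cons_self, rfl, hc⟩
        · exact Or.inr ⟨d', List.mem_cons_of_mem _ hd', rfl, hcx⟩
      · rintro (hx | ⟨d', hd', rfl, hcx⟩)
        · exact Or.inl ((PySem.Set.mem_add ..).mpr (Or.inl hx))
        · rcases List.mem_cons.mp hd' with rfl | hd'
          · exact Or.inl ((PySem.Set.mem_add ..).mpr (Or.inr rfl))
          · exact Or.inr ⟨d', hd', rfl, hcx⟩
    · rw [if_neg hc, ih]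
      constructor
      · rintro (hx | ⟨d', hd', rfl, hcx⟩)
        · exact Or.inl hx
        · exact Or.inr ⟨d', List.mem_cons_of_mem _ hd', rfl, hcx⟩
      · rintro (hx | ⟨d', hd', rfl, hcx⟩)
        · exact Or.inl hx
        · rcases List.mem_cons.mp hd' with rfl | hd'
          · exact absurd hcx hc
          · exact Or.inr ⟨d', hd', rfl, hcx⟩

theorem pvMem_mark (bp : List (Int × Int × Int)) (s : PySem.Set (Int × Int))
    (e : Int × Int × Int) (x : Int × Int) :
    x ∈ pvMark bp s e ↔
      x ∈ s ∨ (e.2.2 = -1 ∧ (x = (e.1, e.2.1) ∨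
        ∃ d ∈ pvDirs, x = (e.1 + d.1, e.2.1 + d.2) ∧ pvContains bp x = true)) := by
  unfold pvMark
  by_cases hl : e.2.2 = -1
  · rw [if_pos (by simp [hl]), pvMem_dirs_fold]
    rw [PySem.Set.mem_add]
    tauto
  · rw [if_neg (by simp [hl])]
    tauto

theorem pvMem_valid (bp : List (Int × Int × Int)) (x : Int × Int) :
    x ∈ pvValid bp ↔
      ∃ e ∈ bp, e.2.2 = -1 ∧ (x = (e.1, e.2.1) ∨
        ∃ d ∈ pvDirs, x = (e.1 + d.1, e.2.1 + d.2) ∧ pvContains bp x = true) := by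
  have key : ∀ (l : List (Int × Int × Int)) (s : PySem.Set (Int × Int)),
      x ∈ l.foldl (pvMark bp) s ↔
        x ∈ s ∨ ∃ e ∈ l, e.2.2 = -1 ∧ (x = (e.1, e.2.1) ∨
          ∃ d ∈ pvDirs, x = (e.1 + d.1, e.2.1 + d.2) ∧ pvContains bp x = true) := by
    intro l
    induction l with
    | nil => simp
    | cons a l ih =>
      intro s
      simp only [List.foldl_cons, ih, pvMem_mark]
      constructor
      · rintro ((hx | ha) | ⟨e, he, h⟩)
        · exact Or.inl hx
        · exact Or.inr ⟨a, List.mem_cons_self, ha⟩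
        · exact Or.inr ⟨e, List.mem_cons_of_mem _ he, h⟩
      · rintro (hx | ⟨e, he, h⟩)
        · exact Or.inl (Or.inl hx)
        · rcases List.mem_cons.mp he with rfl | he
          · exact Or.inl (Or.inr h)
          · exact Or.inr ⟨e, he, h⟩
  simpa [pvValid, PySem.Set.empty] using key bp PySem.Set.empty

-- negation of each direction is again a direction
theorem pvDirs_neg {d : Int × Int} (hd : d ∈ pvDirs) : (-d.1, -d.2) ∈ pvDirs := by
  fin_cases hd <;> decide

-- the heart: for a board entry, A's keep-predicate coincides with membership in B's marked set
theorem pvP_iff_valid {bp : List (Int × Int × Int)} {e : Int × Int × Int}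
    (hnd : (bp.map (fun e => (e.1, e.2.1))).Nodup) (he : e ∈ bp) :
    pvP bp e = true ↔ (e.1, e.2.1) ∈ pvValid bp := by
  rw [pvMem_valid]
  unfold pvP
  rw [Bool.or_eq_true, List.any_eq_true]
  constructor
  · rintro (hlog | ⟨d, hd, hnb⟩)
    · -- e itself is a log
      rw [pvLookup_of_mem hnd he] at hlog
      simp at hlog
      exact ⟨e, he, hlog, Or.inl rfl⟩
    · -- a neighbour of e is a log
      simp only [beq_iff_eq] at hnb
      obtain ⟨e', he', hx, hy, hv⟩ := pvLookup_some_mem hnb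
      refine ⟨e', he', hv, Or.inr ⟨(-d.1, -d.2), pvDirs_neg hd, ?_, pvContains_of_mem he⟩⟩
      simp only [Prod.mk.injEq]
      omega
  · rintro ⟨e', he', hv, hx | ⟨d, hd, hx, _⟩⟩
    · -- the entry with e's key is a log, and by Nodup that entry's lookup is e's lookup
      left
      have h2 := pvLookup_of_mem hnd he'
      obtain ⟨hx1, hx2⟩ := Prod.mk.injEq .. ▸ hx
      rw [hx1, hx2, h2]
      simp [hv]
    · -- e is the (e'+d)-neighbour of the log e', so e' is the (-d)-neighbour of e
      right
      refine ⟨(-d.1, -d.2), pvDirs_neg hd, ?_⟩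
      obtain ⟨h1, h2⟩ := Prod.mk.injEq .. ▸ hx
      have : (e.1 + -d.1, e.2.1 + -d.2) = (e'.1, e'.2.1) := by
        simp only [Prod.mk.injEq]
        constructor <;> omega
      rw [this, pvLookup_of_mem hnd he']
      simp [hv]

-- A's fold builds exactly the in-order filter by pvP (fresh keys always append)
theorem pvFoldA {bp : List (Int × Int × Int)}
    (hnd : (bp.map (fun e => (e.1, e.2.1))).Nodup) :
    ∀ (l : List (Int × Int × Int)) (acc : List (Int × Int × Int)),
      (∀ e ∈ l, e ∈ bp) →
      (l.map (fun e => (e.1, e.2.1))).Nodup →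
      (∀ e ∈ l, acc.any (fun a => a.1 == e.1 && a.2.1 == e.2.1) = false) →
      l.foldl (fun acc e =>
        match pvLookup bp (e.1, e.2.1) with
        | none => acc
        | some v =>
          let isLog := v == -1
          let hasN := pvDirs.any (fun d =>
            pvLookup bp (e.1 + d.1, e.2.1 + d.2) == some (-1))
          if isLog || hasN then pvInsert acc e.1 e.2.1 v else acc) acc
        = acc ++ l.filter (pvP bp) := by
  intro l
  induction l with
  | nil => simp
  | cons e l ih =>
    intro acc hsub hndl hdisj
    have he : e ∈ bp := hsub e List.mem_cons_self
    have hlk := pvLookup_of_mem hnd he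
    simp only [List.foldl_cons, hlk]
    simp only [List.map_cons, List.nodup_cons] at hndl
    have hfresh := hdisj e List.mem_cons_self
    have hstep : ∀ P : Bool, (if P then pvInsert acc e.1 e.2.1 e.2.2 else acc)
        = acc ++ (if P then [e] else []) := by
      intro P
      cases P
      · simp
      · simp only [pvInsert, hfresh, Bool.false_eq_true]
        simp
    by_cases hP : pvP bp e = true
    · have hP' : ((e.2.2 == -1) || pvDirs.any (fun d =>
          pvLookup bp (e.1 + d.1, e.2.1 + d.2) == some (-1))) = true := by
        unfold pvP at hP
        rwa [hlk] at hP
        -- note: (pvLookup bp (e.1,e.2.1) == some (-1)) = (e.2.2 == -1) after hlk rewrite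
      rw [if_pos hP', show pvInsert acc e.1 e.2.1 e.2.2 = acc ++ [e] from by
        simpa using hstep true]
      rw [ih (acc ++ [e]) (fun x hx => hsub x (List.mem_cons_of_mem _ hx)) hndl.2 ?_]
      · simp [hP]
      · intro x hx
        rw [List.any_append]
        simp only [Bool.or_eq_false_iff]
        refine ⟨hdisj x (List.mem_cons_of_mem _ hx), ?_⟩
        simp only [List.any_cons, List.any_nil, Bool.or_false]
        simp only [Bool.and_eq_false_iff]
        have : (e.1, e.2.1) ≠ (x.1, x.2.1) := by
          intro hkey
          exact hndl.1 (hkey ▸ List.mem_map.mpr ⟨x, hx, rfl⟩)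
        by_cases h1 : e.1 = x.1
        · right; simp [Prod.ext_iff] at this; simp [h1] at this ⊢; omega
        · left; simp [h1]
    · have hP' : ((e.2.2 == -1) || pvDirs.any (fun d =>
          pvLookup bp (e.1 + d.1, e.2.1 + d.2) == some (-1))) = false := by
        unfold pvP at hP
        rw [hlk] at hP
        simpa using hP
      rw [if_neg (by simp [hP'])]
      rw [ih acc (fun x hx => hsub x (List.mem_cons_of_mem _ hx)) hndl.2
        (fun x hx => hdisj x (List.mem_cons_of_mem _ hx))]
      simp [hP]

-- ===== VERDICT (by name: the statement is the Claim_ definition above) =====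
theorem board_pruned_py_spec : Claim_equal_board_pruned_py := by
  intro bp _hdom hnd
  unfold Pre_board_pruned_py at hnd
  unfold Spec_board_pruned_py board_pruned_py board_pruned_py_alt
  rw [pvFoldA hnd bp [] (fun _ h => h) hnd (by simp)]
  rw [List.nil_append]
  apply List.filter_congr
  intro e he
  have h := pvP_iff_valid hnd he
  by_cases hv : (e.1, e.2.1) ∈ pvValid bp
  · rw [h.mpr hv, (PySem.Set.contains_iff ..).mpr hv]
  · have h1 : pvP bp e = false := by
      cases hp : pvP bp e
      · rfl
      · exact absurd (h.mp hp) hv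
    have h2 : PySem.Set.contains (pvValid bp) (e.1, e.2.1) = false := by
      cases hc : PySem.Set.contains (pvValid bp) (e.1, e.2.1)
      · rfl
      · exact absurd ((PySem.Set.contains_iff ..).mp hc) hv
    rw [h1, h2]
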